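-- pv_equiv track=rewrite | github.com/padraighu/aoc2021 | solution/11.py | part_two
-- ===== SOURCE A (Python) =====
-- from typing import Deque, List, Set, Tuple
-- import itertools
--
-- def part_two(octs: List[List[int]]) -> int:
--     res = 0
--     deltas = list(itertools.product([1, 0, -1], [-1, 0, 1]))
--     nrow = len(octs)
--     ncol = len(octs[0])
--     step = 0
--     while True:
--         step += 1
--         # initialize with all points in matrix
--         stack = list(itertools.product(range(nrow), range(ncol)))
--         flashed = set()  # type: Set[Tuple[int, int]]
--         while len(stack) > 0:
--             i, j = stack.pop()
--             if (i, j) not in flashed: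
--                 octs[i][j] += 1
--                 if octs[i][j] > 9:
--                     octs[i][j] = 0
--                     flashed.add((i, j))
--                     nbrs = [(i+x,j+y) for (x, y) in deltas if 0 <= i+x < nrow and 0 <= j+y < ncol and (x, y) != (0,0)]
--                     stack += nbrs
--         sync = True
--         for i in range(nrow):
--             for j in range(ncol):
--                 if octs[i][j] != 0:
--                     sync = False
--                     break
--         if sync:
--             res = step
--             break
--     return res
-- ===== SOURCE B (Python) =====
-- def part_two(octs):
--     nrow = len(octs)
--     ncol = len(octs[0])
--     step = 0
--     while True:
--         step += 1
--         # phase 1: one global increment pass, collecting the initial flashers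
--         queue = []
--         flashed = set()
--         for i in range(nrow):
--             for j in range(ncol):
--                 octs[i][j] += 1
--                 if octs[i][j] > 9:
--                     queue.append((i, j))
--                     flashed.add((i, j))
--         # phase 2: propagate cascades breadth-first; a cell is marked flashed
--         # when enqueued and zeroed when dequeued, so it is processed once
--         head = 0
--         while head < len(queue):
--             i, j = queue[head]
--             head += 1
--             octs[i][j] = 0
--             for di in (-1, 0, 1):
--                 for dj in (-1, 0, 1):
--                     if di == 0 and dj == 0:
--                         continue
--                     ni, nj = i + di, j + dj
--                     if 0 <= ni < nrow and 0 <= nj < ncol and (ni, nj) not in flashed: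
--                         octs[ni][nj] += 1
--                         if octs[ni][nj] > 9:
--                             queue.append((ni, nj))
--                             flashed.add((ni, nj))
--         if all(octs[i][j] == 0 for i in range(nrow) for j in range(ncol)):
--             return step
-- ===== Notes on version B (the rewrite author's own statement) =====
-- stated objective: idiomatic
-- what changed: Replaces A's fused lazy stack (every cell pushed up front, incremented on pop, flash cascades interleaved on one LIFO stack) with the canonical two-phase step: one global +1 pass collecting initial flashers, then breadth-first cascade propagation over a once-enqueued FIFO worklist; the proof shows the flash cascade is order-independent (the flash set is the unique minimal closed set), so both steps produce the same grid and step count.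
import Mathlib
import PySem

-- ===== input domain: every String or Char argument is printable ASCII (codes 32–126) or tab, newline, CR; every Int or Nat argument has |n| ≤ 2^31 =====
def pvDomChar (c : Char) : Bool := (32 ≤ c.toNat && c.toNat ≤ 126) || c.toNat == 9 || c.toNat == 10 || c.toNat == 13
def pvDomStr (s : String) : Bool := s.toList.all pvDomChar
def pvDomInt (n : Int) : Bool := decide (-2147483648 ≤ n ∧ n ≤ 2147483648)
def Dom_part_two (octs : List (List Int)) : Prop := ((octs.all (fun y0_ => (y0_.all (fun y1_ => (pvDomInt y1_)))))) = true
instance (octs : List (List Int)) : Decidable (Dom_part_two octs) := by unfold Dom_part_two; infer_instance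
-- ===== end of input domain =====

-- B replaces A's fused lazy stack by the canonical two-phase step (global +1 pass, then a
-- breadth-first once-enqueued cascade); equivalence is about the RETURN value only (both
-- Pythons mutate `octs` in place).

-- ===== PORT A =====
-- grid plumbing shared by both ports (indices are always in range under Pre_)
def getCell (g : List (List Int)) (i j : Nat) : Int := (g.getD i []).getD j 0
def setCell (g : List (List Int)) (i j : Nat) (v : Int) : List (List Int) :=
  g.set i ((g.getD i []).set j v)
-- itertools.product(range(nrow), range(ncol)), row-major
def cellsRM (nrow ncol : Nat) : List (Nat × Nat) :=
  (List.range nrow).flatMap (fun i => (List.range ncol).map (fun j => (i, j)))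
-- fuel bound for the unbounded 'while True' loops (a guard making the recursion total, nothing more)
def pvFuel : Nat := 1000000000000

-- deltas = list(itertools.product([1, 0, -1], [-1, 0, 1]))
def deltasA : List (Int × Int) :=
  [(1,-1),(1,0),(1,1),(0,-1),(0,0),(0,1),(-1,-1),(-1,0),(-1,1)]

-- nbrs = [(i+x, j+y) for (x, y) in deltas if 0 <= i+x < nrow and 0 <= j+y < ncol and (x, y) != (0, 0)]
def nbrsA (nrow ncol i j : Nat) : List (Nat × Nat) :=
  (deltasA.filter (fun d =>
      decide (0 ≤ (i : Int) + d.1) && decide ((i : Int) + d.1 < (nrow : Int)) &&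
      decide (0 ≤ (j : Int) + d.2) && decide ((j : Int) + d.2 < (ncol : Int)) &&
      !(d == ((0 : Int), (0 : Int))))).map
    (fun d => (((i : Int) + d.1).toNat, ((j : Int) + d.2).toNat))

-- A's inner 'while len(stack) > 0' loop; the list's HEAD is the top of Python's stack
-- (Python appends nbrs and pops from the end, hence 'nbrs.reverse ++ rest')
def stackLoopA (nrow ncol : Nat) :
    Nat → List (List Int) → List (Nat × Nat) → PySem.Set (Nat × Nat) →
    List (List Int) × PySem.Set (Nat × Nat)
  | 0, g, _, fl => (g, fl)
  | fuel+1, g, stack, fl =>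
    match stack with
    | [] => (g, fl)
    | (i, j) :: rest =>
      if PySem.Set.contains fl (i, j) then
        stackLoopA nrow ncol fuel g rest fl
      else
        let v := getCell g i j + 1
        let g' := setCell g i j v
        if v > 9 then
          stackLoopA nrow ncol fuel (setCell g' i j 0)
            ((nbrsA nrow ncol i j).reverse ++ rest) (PySem.Set.add fl (i, j))
        else
          stackLoopA nrow ncol fuel g' rest fl

-- the 'sync' scan: nested for-loops with a break, computing "every cell is 0"
def syncScan (nrow ncol : Nat) (g : List (List Int)) : Bool :=
  (List.range nrow).all (fun i => (List.range ncol).all (fun j => getCell g i j == 0))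

-- A's outer 'while True' loop
def whileLoopA (nrow ncol : Nat) : Nat → List (List Int) → Int → Int
  | 0, _, _ => 0
  | fuel+1, g, step =>
    let step' := step + 1
    let r := stackLoopA nrow ncol (10 * (nrow * ncol) + 1) g
               ((cellsRM nrow ncol).reverse) PySem.Set.empty
    if syncScan nrow ncol r.1 then step' else whileLoopA nrow ncol fuel r.1 step'

def part_two (octs : List (List Int)) : Int :=
  let nrow := octs.length
  let ncol := (octs.getD 0 []).length
  whileLoopA nrow ncol pvFuel octs 0

-- ===== PORT B =====
-- the 3×3 delta square B iterates over ('for di in (-1,0,1): for dj in (-1,0,1)'; (0,0) skipped inside)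
def deltasB : List (Int × Int) :=
  [(-1,-1),(-1,0),(-1,1),(0,-1),(0,0),(0,1),(1,-1),(1,0),(1,1)]

-- phase 1: one global increment pass collecting the initial flashers
def phase1B (nrow ncol : Nat) (g : List (List Int)) :
    List (List Int) × List (Nat × Nat) × PySem.Set (Nat × Nat) :=
  (cellsRM nrow ncol).foldl
    (fun st c =>
      let v := getCell st.1 c.1 c.2 + 1
      let g' := setCell st.1 c.1 c.2 v
      if v > 9 then (g', st.2.1 ++ [c], PySem.Set.add st.2.2 c) else (g', st.2.1, st.2.2))
    (g, [], PySem.Set.empty)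

-- the neighbor scan of one dequeued flasher (the two nested 'for di/for dj' loops)
def nbrScanB (nrow ncol : Nat) (i j : Nat)
    (st : List (List Int) × List (Nat × Nat) × PySem.Set (Nat × Nat)) :
    List (List Int) × List (Nat × Nat) × PySem.Set (Nat × Nat) :=
  deltasB.foldl
    (fun st d =>
      if d == ((0 : Int), (0 : Int)) then st
      else
        let ni := (i : Int) + d.1
        let nj := (j : Int) + d.2
        if decide (0 ≤ ni) && decide (ni < (nrow : Int)) && decide (0 ≤ nj) &&
            decide (nj < (ncol : Int)) && !(PySem.Set.contains st.2.2 (ni.toNat, nj.toNat)) then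
          let v := getCell st.1 ni.toNat nj.toNat + 1
          let g' := setCell st.1 ni.toNat nj.toNat v
          if v > 9 then
            (g', st.2.1 ++ [(ni.toNat, nj.toNat)], PySem.Set.add st.2.2 (ni.toNat, nj.toNat))
          else (g', st.2.1, st.2.2)
        else st)
    st

-- phase 2: breadth-first propagation ('while head < len(queue)'); the list holds the
-- not-yet-dequeued part of Python's queue (head pointer = list head)
def queueLoopB (nrow ncol : Nat) :
    Nat → List (List Int) → List (Nat × Nat) → PySem.Set (Nat × Nat) →
    List (List Int) × PySem.Set (Nat × Nat)
  | 0, g, _, fl => (g, fl)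
  | _+1, g, [], fl => (g, fl)
  | fuel+1, g, (i, j) :: rest, fl =>
    let st := nbrScanB nrow ncol i j (setCell g i j 0, rest, fl)
    queueLoopB nrow ncol fuel st.1 st.2.1 st.2.2

-- B's outer 'while True' loop
def whileLoopB (nrow ncol : Nat) : Nat → List (List Int) → Int → Int
  | 0, _, _ => 0
  | fuel+1, g, step =>
    let step' := step + 1
    let p := phase1B nrow ncol g
    let r := queueLoopB nrow ncol (nrow * ncol + 1) p.1 p.2.1 p.2.2
    if (List.range nrow).all (fun i => (List.range ncol).all (fun j => getCell r.1 i j == 0)) then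
      step'
    else whileLoopB nrow ncol fuel r.1 step'

def part_two_alt (octs : List (List Int)) : Int :=
  let nrow := octs.length
  let ncol := (octs.getD 0 []).length
  whileLoopB nrow ncol pvFuel octs 0

-- ===== PRECONDITION & SPEC =====
-- Pre_ excludes exactly the inputs on which A raises IndexError: the empty grid
-- (len(octs[0])) and grids with a row shorter than the first row (octs[i][j] probes it).
def Pre_part_two (octs : List (List Int)) : Prop :=
  octs ≠ [] ∧ ∀ r ∈ octs, (octs.getD 0 []).length ≤ r.length
instance (octs : List (List Int)) : Decidable (Pre_part_two octs) := by
  unfold Pre_part_two; infer_instance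

def pvWitness_part_two : List (List Int) := [[1, 1, 1], [1, 9, 1], [1, 1, 1]]

def Spec_part_two (octs : List (List Int)) (out : Int) : Prop := out = part_two_alt octs
instance (octs : List (List Int)) (out : Int) : Decidable (Spec_part_two octs out) := by
  unfold Spec_part_two; infer_instance

-- ===== CLAIM (what is proved, stated in full; the proofs are below) =====
def Claim_equal_part_two : Prop :=
  ∀ (octs : List (List Int)), Dom_part_two octs → Pre_part_two octs →
    Spec_part_two octs (part_two octs)

-- ===== LEMMAS AND PROOFS =====

-- cells, adjacency and flash counting --------------------------------------------------

-- symmetric 8-neighbourhood predicate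
def adjB (c d : Nat × Nat) : Bool :=
  decide (c ≠ d) && decide (c.1 ≤ d.1 + 1) && decide (d.1 ≤ c.1 + 1) &&
  decide (c.2 ≤ d.2 + 1) && decide (d.2 ≤ c.2 + 1)

-- number of members of F adjacent to c
def fCnt (F : List (Nat × Nat)) (c : Nat × Nat) : Nat :=
  (F.filter (fun e => adjB e c)).length

-- "no unflashed cell would still flash": T absorbs the cascade of grid g0
def Closed (nrow ncol : Nat) (g0 : List (List Int)) (T : List (Nat × Nat)) : Prop :=
  ∀ c : Nat × Nat, c.1 < nrow → c.2 < ncol → c ∉ T →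
    getCell g0 c.1 c.2 + 1 + (fCnt T c : Int) ≤ 9

def SameShape (g0 g : List (List Int)) : Prop :=
  g.length = g0.length ∧ ∀ k, (g.getD k []).length = (g0.getD k []).length

def Rect (nrow ncol : Nat) (g : List (List Int)) : Prop :=
  g.length = nrow ∧ ∀ k, k < nrow → ncol ≤ (g.getD k []).length

-- the common post-state of one simulation step: F is the (unique) minimal closed flash
-- set and the grid is determined pointwise by F
def EndSt (nrow ncol : Nat) (g0 g : List (List Int)) (F : List (Nat × Nat)) : Prop :=
  SameShape g0 g ∧ F.Nodup ∧ (∀ c ∈ F, c.1 < nrow ∧ c.2 < ncol) ∧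
  (∀ c : Nat × Nat, c.1 < nrow → c.2 < ncol →
    getCell g c.1 c.2 = if c ∈ F then 0 else getCell g0 c.1 c.2 + 1 + (fCnt F c : Int)) ∧
  Closed nrow ncol g0 F ∧
  (∀ i j : Nat, ¬(i < nrow ∧ j < ncol) → getCell g i j = getCell g0 i j) ∧
  (∀ T, Closed nrow ncol g0 T → ∀ c ∈ F, c ∈ T)

-- small list facts ---------------------------------------------------------------------

theorem nodup_len_le {α : Type} [DecidableEq α] {l1 l2 : List α}
    (h1 : l1.Nodup) (h : l1 ⊆ l2) : l1.length ≤ l2.length := by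
  calc l1.length = l1.toFinset.card := (List.toFinset_card_of_nodup h1).symm
    _ ≤ l2.toFinset.card :=
        Finset.card_le_card (fun a ha => List.mem_toFinset.mpr (h (List.mem_toFinset.mp ha)))
    _ ≤ l2.length := l2.toFinset_card_le

theorem fCnt_mono {F T : List (Nat × Nat)} (hnd : F.Nodup) (h : F ⊆ T) (c : Nat × Nat) :
    fCnt F c ≤ fCnt T c := by
  refine nodup_len_le (hnd.filter _) ?_
  intro a ha
  rcases List.mem_filter.mp ha with ⟨ha1, ha2⟩
  exact List.mem_filter.mpr ⟨h ha1, ha2⟩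

theorem fCnt_append_single (F : List (Nat × Nat)) (e c : Nat × Nat) :
    fCnt (F ++ [e]) c = fCnt F c + (if adjB e c then 1 else 0) := by
  by_cases h : adjB e c <;> simp [fCnt, List.filter_append, h]

theorem fCnt_eq_of_mem_iff {F T : List (Nat × Nat)} (hF : F.Nodup) (hT : T.Nodup)
    (h : ∀ a, a ∈ F ↔ a ∈ T) (c : Nat × Nat) : fCnt F c = fCnt T c :=
  (((List.perm_ext_iff_of_nodup hF hT).mpr h).filter _).length_eq

-- grid plumbing facts ------------------------------------------------------------------

theorem length_setCell (g : List (List Int)) (i j : Nat) (v : Int) :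
    (setCell g i j v).length = g.length := by simp [setCell]

theorem rowlen_setCell (g : List (List Int)) (i j k : Nat) (v : Int) :
    ((setCell g i j v).getD k []).length = ((g.getD k []).length) := by
  unfold setCell
  by_cases hik : i = k
  · subst hik
    by_cases hi : i < g.length
    · simp [List.getD, List.getElem?_set_self (by simpa using hi)]
    · simp [List.getD, hi]
  · simp [List.getD, List.getElem?_set_ne hik]

theorem sameShape_setCell (g : List (List Int)) (i j : Nat) (v : Int) :
    SameShape g (setCell g i j v) :=
  ⟨length_setCell g i j v, fun k => rowlen_setCell g i j k v⟩

theorem sameShape_refl (g : List (List Int)) : SameShape g g := ⟨rfl, fun _ => rfl⟩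

theorem sameShape_trans {g0 g1 g2 : List (List Int)}
    (h1 : SameShape g0 g1) (h2 : SameShape g1 g2) : SameShape g0 g2 :=
  ⟨h2.1.trans h1.1, fun k => (h2.2 k).trans (h1.2 k)⟩

theorem rect_of_sameShape {nrow ncol : Nat} {g0 g : List (List Int)}
    (hR : Rect nrow ncol g0) (hs : SameShape g0 g) : Rect nrow ncol g :=
  ⟨hs.1.trans hR.1, fun k hk => (hR.2 k hk).trans_eq (hs.2 k).symm⟩

theorem getCell_setCell_self {g : List (List Int)} {i j : Nat} (v : Int)
    (hi : i < g.length) (hj : j < (g.getD i []).length) :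
    getCell (setCell g i j v) i j = v := by
  unfold getCell setCell
  simp [List.getD, List.getElem?_set_self (by simpa using hi)]
  simp [List.getElem?_set_self (by simpa using hj)]


theorem getCell_setCell_ne {i j i' j' : Nat} (g : List (List Int)) (v : Int)
    (h : (i, j) ≠ (i', j')) :
    getCell (setCell g i j v) i' j' = getCell g i' j' := by
  unfold getCell setCell
  by_cases hik : i = i'
  · subst hik
    have hj : j ≠ j' := fun hjj => h (by rw [hjj])
    by_cases hi : i < g.length
    · simp [List.getD, List.getElem?_set_self (by simpa using hi),
        List.getElem?_set_ne, hj]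
    · simp [List.getD, hi]
  · simp [List.getD, List.getElem?_set_ne hik]

theorem mem_cellsRM {nrow ncol : Nat} {c : Nat × Nat} :
    c ∈ cellsRM nrow ncol ↔ c.1 < nrow ∧ c.2 < ncol := by
  cases c with
  | mk a b => simp [cellsRM]

theorem nodup_cellsRM (nrow ncol : Nat) : (cellsRM nrow ncol).Nodup := by
  apply List.nodup_flatMap.mpr
  constructor
  · intro i _
    exact (List.nodup_range).map (fun a b h => by simpa using h)
  · apply (List.nodup_range (n := nrow)).pairwise_of_forall_ne
    intro i hi i' hi' hne c hc hc'
    simp only [List.mem_map] at hc hc'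
    rcases hc with ⟨j, _, rfl⟩
    rcases hc' with ⟨j', _, h⟩
    exact hne (by simpa using (Prod.ext_iff.mp h).1.symm)

theorem length_cellsRM (nrow ncol : Nat) : (cellsRM nrow ncol).length = nrow * ncol := by
  simp [cellsRM, List.length_flatMap]

-- neighbour lists ----------------------------------------------------------------------

theorem adjB_iff (i j a b : Nat) : adjB (i,j) (a,b) = true ↔
    (¬(i = a ∧ j = b) ∧ i ≤ a+1 ∧ a ≤ i+1 ∧ j ≤ b+1 ∧ b ≤ j+1) := by
  simp only [adjB, Prod.ext_iff, Bool.and_eq_true, decide_eq_true_eq, ne_eq, not_and]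
  constructor
  · rintro ⟨⟨⟨⟨h0, h1⟩, h2⟩, h3⟩, h4⟩; tauto
  · rintro ⟨h0, h1, h2, h3, h4⟩; tauto

theorem mem_nbrsA {nrow ncol i j : Nat} {c : Nat × Nat} (hi : i < nrow) (hj : j < ncol) :
    c ∈ nbrsA nrow ncol i j ↔ c.1 < nrow ∧ c.2 < ncol ∧ adjB (i, j) c := by
  obtain ⟨a, b⟩ := c
  constructor
  · intro hmem
    obtain ⟨d, hf, heq⟩ := List.mem_map.mp hmem
    obtain ⟨hd, hp⟩ := List.mem_filter.mp hf
    obtain ⟨x, y⟩ := d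
    have hp' : 0 ≤ (i:Int)+x ∧ (i:Int)+x < nrow ∧ 0 ≤ (j:Int)+y ∧ (j:Int)+y < ncol ∧ ¬(x = 0 ∧ y = 0) := by
      simpa [Prod.ext_iff, and_assoc] using hp
    have heq' : ((i:Int)+x).toNat = a ∧ ((j:Int)+y).toNat = b := by
      simpa [Prod.ext_iff] using heq
    have hx9 : (x = 1 ∨ x = 0 ∨ x = -1) ∧ (y = -1 ∨ y = 0 ∨ y = 1) := by
      simp only [deltasA, List.mem_cons, List.not_mem_nil, or_false, Prod.mk.injEq] at hd
      rcases hd with h|h|h|h|h|h|h|h|h <;> simp [h.1, h.2]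
    obtain ⟨hx9, hy9⟩ := hx9
    simp only [adjB_iff]
    rcases hx9 with h|h|h <;> rcases hy9 with h'|h'|h' <;> subst h <;> subst h' <;> omega
  · rintro ⟨ha, hb, hadj⟩
    rw [adjB_iff] at hadj
    apply List.mem_map.mpr
    refine ⟨((a : Int) - i, (b : Int) - j), List.mem_filter.mpr ⟨?_, ?_⟩, ?_⟩
    · have hx : (a : Int) - i = -1 ∨ (a : Int) - i = 0 ∨ (a : Int) - i = 1 := by omega
      have hy : (b : Int) - j = -1 ∨ (b : Int) - j = 0 ∨ (b : Int) - j = 1 := by omega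
      rcases hx with hx|hx|hx <;> rcases hy with hy|hy|hy <;>
        simp [deltasA, hx, hy, Prod.ext_iff]
    · simp only [Bool.and_eq_true, decide_eq_true_eq, Bool.not_eq_true',
        beq_eq_false_iff_ne, ne_eq, Prod.ext_iff, not_and]
      constructor
      · omega
      · intro h1 h2; omega
    · simp only [Prod.mk.injEq]; omega

theorem nodup_nbrsA (nrow ncol i j : Nat) : (nbrsA nrow ncol i j).Nodup := by
  apply List.Nodup.map_on
  · intro x hx y hy hxy
    obtain ⟨_, hpx⟩ := List.mem_filter.mp hx
    obtain ⟨_, hpy⟩ := List.mem_filter.mp hy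
    have hpx' : 0 ≤ (i:Int)+x.1 ∧ 0 ≤ (j:Int)+x.2 := by
      simp only [Bool.and_eq_true, decide_eq_true_eq] at hpx; tauto
    have hpy' : 0 ≤ (i:Int)+y.1 ∧ 0 ≤ (j:Int)+y.2 := by
      simp only [Bool.and_eq_true, decide_eq_true_eq] at hpy; tauto
    have h1 := congrArg Prod.fst hxy
    have h2 := congrArg Prod.snd hxy
    simp only at h1 h2
    obtain ⟨x1, x2⟩ := x; obtain ⟨y1, y2⟩ := y
    simp only at h1 h2 hpx' hpy'
    have : x1 = y1 ∧ x2 = y2 := by omega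
    simp [this.1, this.2]
  · exact (List.Nodup.filter _ (by decide))

theorem length_nbrsA_le (nrow ncol i j : Nat) : (nbrsA nrow ncol i j).length ≤ 8 := by
  have h : ((deltasA.filter (fun d =>
      decide (0 ≤ (i : Int) + d.1) && decide ((i : Int) + d.1 < (nrow : Int)) &&
      decide (0 ≤ (j : Int) + d.2) && decide ((j : Int) + d.2 < (ncol : Int)) &&
      !(d == ((0 : Int), (0 : Int))))).length) < deltasA.length := by
    apply List.length_filter_lt_length_iff_exists.mpr
    exact ⟨((0:Int),(0:Int)), by simp [deltasA], by simp⟩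
  simpa [nbrsA, deltasA] using Nat.lt_succ_iff.mp (by simpa [deltasA] using h)

-- the cells B's delta scan touches, in scan order
def nbrsB (nrow ncol i j : Nat) : List (Nat × Nat) :=
  (deltasB.filter (fun d =>
      !(d == ((0 : Int), (0 : Int))) &&
      (decide (0 ≤ (i : Int) + d.1) && decide ((i : Int) + d.1 < (nrow : Int)) &&
       decide (0 ≤ (j : Int) + d.2) && decide ((j : Int) + d.2 < (ncol : Int))))).map
    (fun d => (((i : Int) + d.1).toNat, ((j : Int) + d.2).toNat))

theorem mem_nbrsB {nrow ncol i j : Nat} {c : Nat × Nat} (hi : i < nrow) (hj : j < ncol) :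
    c ∈ nbrsB nrow ncol i j ↔ c.1 < nrow ∧ c.2 < ncol ∧ adjB (i, j) c := by
  obtain ⟨a, b⟩ := c
  constructor
  · intro hmem
    obtain ⟨d, hf, heq⟩ := List.mem_map.mp hmem
    obtain ⟨hd, hp⟩ := List.mem_filter.mp hf
    obtain ⟨x, y⟩ := d
    have hp' : (j:Int) + y < ncol ∧ (i:Int) + x < nrow ∧ 0 ≤ (i:Int)+x ∧ 0 ≤ (j:Int)+y ∧ (x = 0 → ¬y = 0) := by
      simpa [Prod.ext_iff, and_assoc, and_comm] using hp
    have heq' : ((i:Int)+x).toNat = a ∧ ((j:Int)+y).toNat = b := by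
      simpa [Prod.ext_iff] using heq
    have hx9 : (x = 1 ∨ x = 0 ∨ x = -1) ∧ (y = -1 ∨ y = 0 ∨ y = 1) := by
      simp only [deltasB, List.mem_cons, List.not_mem_nil, or_false, Prod.mk.injEq] at hd
      rcases hd with h|h|h|h|h|h|h|h|h <;> simp [h.1, h.2]
    obtain ⟨hx9, hy9⟩ := hx9
    simp only [adjB_iff]
    rcases hx9 with h|h|h <;> rcases hy9 with h'|h'|h' <;> subst h <;> subst h' <;> omega
  · rintro ⟨ha, hb, hadj⟩
    rw [adjB_iff] at hadj
    apply List.mem_map.mpr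
    refine ⟨((a : Int) - i, (b : Int) - j), List.mem_filter.mpr ⟨?_, ?_⟩, ?_⟩
    · have hx : (a : Int) - i = -1 ∨ (a : Int) - i = 0 ∨ (a : Int) - i = 1 := by omega
      have hy : (b : Int) - j = -1 ∨ (b : Int) - j = 0 ∨ (b : Int) - j = 1 := by omega
      rcases hx with hx|hx|hx <;> rcases hy with hy|hy|hy <;>
        simp [deltasB, hx, hy, Prod.ext_iff]
    · simp only [Bool.and_eq_true, decide_eq_true_eq, Bool.not_eq_true',
        beq_eq_false_iff_ne, ne_eq, Prod.ext_iff, not_and]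
      constructor
      · intro h1 h2; omega
      · omega
    · simp only [Prod.mk.injEq]; omega

theorem nodup_nbrsB (nrow ncol i j : Nat) : (nbrsB nrow ncol i j).Nodup := by
  apply List.Nodup.map_on
  · intro x hx y hy hxy
    obtain ⟨_, hpx⟩ := List.mem_filter.mp hx
    obtain ⟨_, hpy⟩ := List.mem_filter.mp hy
    have hpx' : 0 ≤ (i:Int)+x.1 ∧ 0 ≤ (j:Int)+x.2 := by
      simp only [Bool.and_eq_true, decide_eq_true_eq] at hpx; tauto
    have hpy' : 0 ≤ (i:Int)+y.1 ∧ 0 ≤ (j:Int)+y.2 := by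
      simp only [Bool.and_eq_true, decide_eq_true_eq] at hpy; tauto
    have h1 := congrArg Prod.fst hxy
    have h2 := congrArg Prod.snd hxy
    simp only at h1 h2
    obtain ⟨x1, x2⟩ := x; obtain ⟨y1, y2⟩ := y
    simp only at h1 h2 hpx' hpy'
    have : x1 = y1 ∧ x2 = y2 := by omega
    simp [this.1, this.2]
  · exact (List.Nodup.filter _ (by decide))

-- invariant of A's stack loop ----------------------------------------------------------

structure InvA (nrow ncol : Nat) (g0 g : List (List Int))
    (stack fl : List (Nat × Nat)) : Prop where
  shape : SameShape g0 g
  nd : fl.Nodup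
  flcells : ∀ c ∈ fl, c.1 < nrow ∧ c.2 < ncol
  stcells : ∀ c ∈ stack, c.1 < nrow ∧ c.2 < ncol
  flzero : ∀ c ∈ fl, getCell g c.1 c.2 = 0
  val : ∀ c : Nat × Nat, c.1 < nrow → c.2 < ncol → c ∉ fl →
    getCell g c.1 c.2 + (stack.count c : Int) = getCell g0 c.1 c.2 + 1 + (fCnt fl c : Int)
  bnd : ∀ c : Nat × Nat, c.1 < nrow → c.2 < ncol → c ∉ fl → stack.count c = 0 →
    getCell g c.1 c.2 ≤ 9
  oob : ∀ i j : Nat, ¬(i < nrow ∧ j < ncol) → getCell g i j = getCell g0 i j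
  minim : ∀ T, Closed nrow ncol g0 T → ∀ c ∈ fl, c ∈ T

theorem getCell_double_set {g : List (List Int)} {i j : Nat} (v : Int) (a b : Nat) :
    getCell (setCell (setCell g i j v) i j 0) a b =
      if (a, b) = (i, j) then (0 : Int) else getCell g a b := by
  have hrow0 : ∀ gg : List (List Int), (gg.getD i []).length ≤ j → getCell gg i j = 0 := by
    intro gg hlen
    exact List.getD_eq_default _ 0 hlen
  by_cases h : (a, b) = (i, j)
  · have ha : a = i := (Prod.ext_iff.mp h).1
    have hb : b = j := (Prod.ext_iff.mp h).2
    subst ha; subst hb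
    rw [if_pos rfl]
    by_cases hj : b < (g.getD a []).length
    · by_cases hi : a < g.length
      · have hi' : a < (setCell g a b v).length := by rw [length_setCell]; exact hi
        have hj' : b < ((setCell g a b v).getD a []).length := by rw [rowlen_setCell]; exact hj
        exact getCell_setCell_self 0 hi' hj'
      · -- row index out of range: both setCell are no-ops on reads of row a
        have hlen : ∀ gg : List (List Int), gg.length ≤ a → getCell gg a b = 0 := by
          intro gg hl
          unfold getCell
          rw [List.getD_eq_default _ _ hl]
          simp
        rw [hlen _ (by rw [length_setCell, length_setCell]; omega)]
    · have h1 : ((setCell (setCell g a b v) a b 0).getD a []).length ≤ b := by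
        rw [rowlen_setCell, rowlen_setCell]; omega
      exact hrow0 _ h1
  · rw [if_neg h]
    have hne : (i, j) ≠ (a, b) := fun he => h he.symm
    rw [getCell_setCell_ne _ _ hne, getCell_setCell_ne _ _ hne]

theorem invA_nil {nrow ncol : Nat} {g0 g : List (List Int)} {fl : List (Nat × Nat)}
    (hInv : InvA nrow ncol g0 g [] fl) : EndSt nrow ncol g0 g fl := by
  obtain ⟨hs, hnd, hflc, _, hflz, hval, hbnd, hoob, hmin⟩ := hInv
  refine ⟨hs, hnd, hflc, ?_, ?_, hoob, hmin⟩
  · intro c h1 h2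
    by_cases hc : c ∈ fl
    · simp [hc, hflz c hc]
    · have := hval c h1 h2 hc
      simp only [List.count_nil] at this
      simp [hc]; omega
  · intro c h1 h2 hc
    have h := hval c h1 h2 hc
    have hb := hbnd c h1 h2 hc List.count_nil
    simp only [List.count_nil] at h
    omega

theorem stackLoopA_end {nrow ncol : Nat} {g0 : List (List Int)}
    (hR : Rect nrow ncol g0) :
    ∀ (fuel : Nat) (g : List (List Int)) (stack fl : List (Nat × Nat)),
      InvA nrow ncol g0 g stack fl →
      stack.length + 9 * (nrow * ncol - fl.length) ≤ fuel →
      EndSt nrow ncol g0 (stackLoopA nrow ncol fuel g stack fl).1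
        (stackLoopA nrow ncol fuel g stack fl).2 := by
  intro fuel
  induction fuel with
  | zero =>
    intro g stack fl hInv hm
    have hstack : stack = [] := by
      cases stack with
      | nil => rfl
      | cons c rest => simp at hm
    subst hstack
    simpa [stackLoopA] using invA_nil hInv
  | succ fuel ih =>
    intro g stack fl hInv hm
    match stack with
    | [] => simpa [stackLoopA] using invA_nil hInv
    | (i, j) :: rest =>
      have hij : i < nrow ∧ j < ncol := hInv.stcells _ List.mem_cons_self
      have hRg : Rect nrow ncol g := rect_of_sameShape hR hInv.shape
      have hfln : fl.length ≤ nrow * ncol := by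
        refine le_trans (nodup_len_le hInv.nd (fun c hc => mem_cellsRM.mpr (hInv.flcells c hc))) ?_
        rw [length_cellsRM]
      by_cases hfl : (i, j) ∈ fl
      · rw [stackLoopA, if_pos (by simpa [PySem.Set.contains_iff] using hfl)]
        refine ih g rest fl ?_ (by simp at hm ⊢; omega)
        obtain ⟨hs, hnd, hflc, hstc, hflz, hval, hbnd, hoob, hmin⟩ := hInv
        refine ⟨hs, hnd, hflc, fun c hc => hstc c (List.mem_cons_of_mem _ hc), hflz, ?_, ?_, hoob, hmin⟩
        · intro c h1 h2 hc
          have hne : (i, j) ≠ c := fun h => hc (h ▸ hfl)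
          have := hval c h1 h2 hc
          rwa [List.count_cons_of_ne hne] at this
        · intro c h1 h2 hc hcnt
          have hne : (i, j) ≠ c := fun h => hc (h ▸ hfl)
          exact hbnd c h1 h2 hc (by rwa [List.count_cons_of_ne hne])
      · rw [stackLoopA, if_neg (by simpa [PySem.Set.contains_iff] using hfl)]
        have hilen : i < g.length := by rw [hRg.1]; exact hij.1
        have hjlen : j < (g.getD i []).length := lt_of_lt_of_le hij.2 (hRg.2 i hij.1)
        by_cases hv : getCell g i j + 1 > 9
        · rw [if_pos hv]
          -- flash branch
          have hadd : PySem.Set.add fl (i, j) = fl ++ [(i, j)] := PySem.Set.add_of_not_mem hfl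
          rw [hadd]
          -- value of the popped cell, needed for minimality
          have hvalij := hInv.val (i, j) hij.1 hij.2 hfl
          rw [List.count_cons_self] at hvalij
          refine ih _ _ _ ?_ ?_
          · obtain ⟨hs, hnd, hflc, hstc, hflz, hval, hbnd, hoob, hmin⟩ := hInv
            have hget : ∀ a b : Nat,
                getCell (setCell (setCell g i j (getCell g i j + 1)) i j 0) a b =
                  if (a, b) = (i, j) then (0 : Int) else getCell g a b :=
              getCell_double_set _
            refine ⟨?_, ?_, ?_, ?_, ?_, ?_, ?_, ?_, ?_⟩
            · exact sameShape_trans hs (sameShape_trans (sameShape_setCell ..) (sameShape_setCell ..))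
            · refine List.Nodup.append hnd (List.nodup_singleton _) ?_
              intro a ha hb
              simp only [List.mem_singleton] at hb
              subst hb; exact hfl ha
            · intro c hc
              rcases List.mem_append.mp hc with h | h
              · exact hflc c h
              · simp at h; subst h; exact hij
            · intro c hc
              rcases List.mem_append.mp hc with h | h
              · have := List.mem_reverse.mp h
                have := (mem_nbrsA hij.1 hij.2).mp this
                exact ⟨this.1, this.2.1⟩
              · exact hstc c (List.mem_cons_of_mem _ h)
            · intro c hc
              rcases List.mem_append.mp hc with h | h
              · rw [hget]
                have hne : c ≠ (i, j) := fun he => hfl (he ▸ h)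
                rw [if_neg (by simpa using hne)]
                exact hflz c h
              · simp at h; subst h; simp [hget]
            · intro c h1 h2 hc
              simp only [List.mem_append, List.mem_singleton, not_or] at hc
              obtain ⟨hc1, hc2⟩ := hc
              rw [hget, if_neg (by simpa using hc2)]
              have hcnt : ((nbrsA nrow ncol i j).reverse ++ rest).count c =
                  (nbrsA nrow ncol i j).count c + rest.count c := by
                rw [List.count_append, List.count_reverse]
              have hnbr : (nbrsA nrow ncol i j).count c =
                  if adjB (i, j) c then 1 else 0 := by
                by_cases hadj : adjB (i, j) c
                · rw [if_pos hadj]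
                  exact List.count_eq_one_of_mem (nodup_nbrsA ..)
                    ((mem_nbrsA hij.1 hij.2).mpr ⟨h1, h2, hadj⟩)
                · rw [if_neg hadj, List.count_eq_zero]
                  intro habs
                  exact hadj ((mem_nbrsA hij.1 hij.2).mp habs).2.2
              have hfcnt : fCnt (fl ++ [(i, j)]) c =
                  fCnt fl c + if adjB (i, j) c then 1 else 0 := fCnt_append_single ..
              have hold := hval c h1 h2 hc1
              rw [List.count_cons_of_ne (fun h => hc2 h.symm)] at hold
              rw [hcnt, hnbr, hfcnt]
              split <;> push_cast <;> omega
            · intro c h1 h2 hc hcnt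
              simp only [List.mem_append, List.mem_singleton, not_or] at hc
              obtain ⟨hc1, hc2⟩ := hc
              rw [List.count_append, List.count_reverse] at hcnt
              have hcr : (nbrsA nrow ncol i j).count c = 0 ∧ rest.count c = 0 := by omega
              rw [hget, if_neg (by simpa using hc2)]
              refine hbnd c h1 h2 hc1 ?_
              rw [List.count_cons_of_ne (fun h => hc2 h.symm)]
              exact hcr.2
            · intro a b hab
              rw [hget, if_neg (fun he => hab (by cases he; exact hij))]
              exact hoob a b hab
            · intro T hT c hc
              rcases List.mem_append.mp hc with h | h
              · exact hmin T hT c h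
              · simp at h; subst h
                by_contra hnotT
                have hclosed := hT (i, j) hij.1 hij.2 hnotT
                have hsub : fl ⊆ T := fun x hx => hmin T hT x hx
                have hfle : fCnt fl (i, j) ≤ fCnt T (i, j) := fCnt_mono hnd hsub _
                have hvalij' : getCell g i j + ((rest.count (i, j) + 1 : Nat) : Int) =
                    getCell g0 i j + 1 + (fCnt fl (i, j) : Int) := hvalij
                have hclosed' : getCell g0 i j + 1 + (fCnt T (i, j) : Int) ≤ 9 := hclosed
                push_cast at hvalij'
                omega
          · have h8 := length_nbrsA_le nrow ncol i j
            simp only [List.length_append, List.length_reverse, List.length_cons,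
              List.length_append] at hm ⊢
            have hfl1 : fl.length + 1 ≤ nrow * ncol := by
              have : fl ++ [(i, j)] ⊆ cellsRM nrow ncol := by
                intro c hc
                rcases List.mem_append.mp hc with h | h
                · exact mem_cellsRM.mpr (hInv.flcells c h)
                · simp at h; subst h; exact mem_cellsRM.mpr hij
              have hnd2 : (fl ++ [(i, j)]).Nodup := by
                refine List.Nodup.append hInv.nd (List.nodup_singleton _) ?_
                intro a ha hb
                simp only [List.mem_singleton] at hb
                subst hb; exact hfl ha
              have := nodup_len_le hnd2 this
              simpa [length_cellsRM] using this
            omega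
        · rw [if_neg hv]
          refine ih _ _ _ ?_ (by simp at hm ⊢; omega)
          obtain ⟨hs, hnd, hflc, hstc, hflz, hval, hbnd, hoob, hmin⟩ := hInv
          have hget : ∀ a b : Nat,
              getCell (setCell g i j (getCell g i j + 1)) a b =
                if (a, b) = (i, j) then getCell g i j + 1 else getCell g a b := by
            intro a b
            by_cases h : (a, b) = (i, j)
            · cases h; rw [if_pos rfl]; exact getCell_setCell_self _ hilen hjlen
            · rw [if_neg h, getCell_setCell_ne g _ (fun he => h he.symm)]
          refine ⟨?_, hnd, hflc, fun c hc => hstc c (List.mem_cons_of_mem _ hc), ?_, ?_, ?_, ?_, hmin⟩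
          · exact sameShape_trans hs (sameShape_setCell ..)
          · intro c hc
            have hne : ¬((c.1, c.2) = (i, j)) := by
              intro he
              have hce : c = (i, j) := (Prod.mk.eta).symm.trans he
              exact hfl (hce ▸ hc)
            rw [hget, if_neg hne]
            exact hflz c hc
          · intro c h1 h2 hc
            rw [hget]
            by_cases he : c = (i, j)
            · subst he
              rw [if_pos rfl]
              have := hval _ h1 h2 hc
              rw [List.count_cons_self] at this
              push_cast at this ⊢
              omega
            · rw [if_neg (by simpa using he)]
              have := hval c h1 h2 hc
              rwa [List.count_cons_of_ne (fun h => he h.symm)] at this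
          · intro c h1 h2 hc hcnt
            rw [hget]
            by_cases he : c = (i, j)
            · subst he; rw [if_pos rfl]; omega
            · rw [if_neg (by simpa using he)]
              refine hbnd c h1 h2 hc ?_
              rwa [List.count_cons_of_ne (fun h => he h.symm)]
          · intro a b hab
            rw [hget, if_neg (fun he => hab (by cases he; exact hij))]
            exact hoob a b hab

-- invariant of B's queue loop ----------------------------------------------------------

structure InvB (nrow ncol : Nat) (g0 g : List (List Int))
    (proc pend fl : List (Nat × Nat)) : Prop where
  shape : SameShape g0 g
  nd : fl.Nodup
  flcells : ∀ c ∈ fl, c.1 < nrow ∧ c.2 < ncol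
  split : fl = proc ++ pend
  przero : ∀ c ∈ proc, getCell g c.1 c.2 = 0
  val : ∀ c : Nat × Nat, c.1 < nrow → c.2 < ncol → c ∉ fl →
    getCell g c.1 c.2 = getCell g0 c.1 c.2 + 1 + (fCnt proc c : Int) ∧ getCell g c.1 c.2 ≤ 9
  oob : ∀ i j : Nat, ¬(i < nrow ∧ j < ncol) → getCell g i j = getCell g0 i j
  minim : ∀ T, Closed nrow ncol g0 T → ∀ c ∈ fl, c ∈ T

-- the cells a prefix of the delta scan touches
def tgtsB (nrow ncol i j : Nat) (ds : List (Int × Int)) : List (Nat × Nat) :=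
  (ds.filter (fun d =>
      !(d == ((0 : Int), (0 : Int))) &&
      (decide (0 ≤ (i : Int) + d.1) && decide ((i : Int) + d.1 < (nrow : Int)) &&
       decide (0 ≤ (j : Int) + d.2) && decide ((j : Int) + d.2 < (ncol : Int))))).map
    (fun d => (((i : Int) + d.1).toNat, ((j : Int) + d.2).toNat))

theorem scanB_fold {nrow ncol : Nat} (i j : Nat) :
    ∀ (ds : List (Int × Int)) (g : List (List Int)) (pend fl : List (Nat × Nat)),
      Rect nrow ncol g → (tgtsB nrow ncol i j ds).Nodup →
      (ds.foldl (fun st d =>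
          if d == ((0 : Int), (0 : Int)) then st
          else
            let ni := (i : Int) + d.1
            let nj := (j : Int) + d.2
            if decide (0 ≤ ni) && decide (ni < (nrow : Int)) && decide (0 ≤ nj) &&
                decide (nj < (ncol : Int)) && !(PySem.Set.contains st.2.2 (ni.toNat, nj.toNat)) then
              let v := getCell st.1 ni.toNat nj.toNat + 1
              let g' := setCell st.1 ni.toNat nj.toNat v
              if v > 9 then
                (g', st.2.1 ++ [(ni.toNat, nj.toNat)], PySem.Set.add st.2.2 (ni.toNat, nj.toNat))
              else (g', st.2.1, st.2.2)
            else st)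
        ((g, pend, fl) : List (List Int) × List (Nat × Nat) × PySem.Set (Nat × Nat))).2.1 =
          pend ++ (tgtsB nrow ncol i j ds).filter
            (fun c => !(fl.contains c) && decide (getCell g c.1 c.2 + 1 > 9)) ∧
      (ds.foldl (fun st d =>
          if d == ((0 : Int), (0 : Int)) then st
          else
            let ni := (i : Int) + d.1
            let nj := (j : Int) + d.2
            if decide (0 ≤ ni) && decide (ni < (nrow : Int)) && decide (0 ≤ nj) &&
                decide (nj < (ncol : Int)) && !(PySem.Set.contains st.2.2 (ni.toNat, nj.toNat)) then
              let v := getCell st.1 ni.toNat nj.toNat + 1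
              let g' := setCell st.1 ni.toNat nj.toNat v
              if v > 9 then
                (g', st.2.1 ++ [(ni.toNat, nj.toNat)], PySem.Set.add st.2.2 (ni.toNat, nj.toNat))
              else (g', st.2.1, st.2.2)
            else st)
        ((g, pend, fl) : List (List Int) × List (Nat × Nat) × PySem.Set (Nat × Nat))).2.2 =
          fl ++ (tgtsB nrow ncol i j ds).filter
            (fun c => !(fl.contains c) && decide (getCell g c.1 c.2 + 1 > 9)) ∧
      SameShape g (ds.foldl (fun st d =>
          if d == ((0 : Int), (0 : Int)) then st
          else
            let ni := (i : Int) + d.1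
            let nj := (j : Int) + d.2
            if decide (0 ≤ ni) && decide (ni < (nrow : Int)) && decide (0 ≤ nj) &&
                decide (nj < (ncol : Int)) && !(PySem.Set.contains st.2.2 (ni.toNat, nj.toNat)) then
              let v := getCell st.1 ni.toNat nj.toNat + 1
              let g' := setCell st.1 ni.toNat nj.toNat v
              if v > 9 then
                (g', st.2.1 ++ [(ni.toNat, nj.toNat)], PySem.Set.add st.2.2 (ni.toNat, nj.toNat))
              else (g', st.2.1, st.2.2)
            else st)
        ((g, pend, fl) : List (List Int) × List (Nat × Nat) × PySem.Set (Nat × Nat))).1 ∧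
      (∀ a b : Nat, getCell ((ds.foldl (fun st d =>
          if d == ((0 : Int), (0 : Int)) then st
          else
            let ni := (i : Int) + d.1
            let nj := (j : Int) + d.2
            if decide (0 ≤ ni) && decide (ni < (nrow : Int)) && decide (0 ≤ nj) &&
                decide (nj < (ncol : Int)) && !(PySem.Set.contains st.2.2 (ni.toNat, nj.toNat)) then
              let v := getCell st.1 ni.toNat nj.toNat + 1
              let g' := setCell st.1 ni.toNat nj.toNat v
              if v > 9 then
                (g', st.2.1 ++ [(ni.toNat, nj.toNat)], PySem.Set.add st.2.2 (ni.toNat, nj.toNat))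
              else (g', st.2.1, st.2.2)
            else st)
        ((g, pend, fl) : List (List Int) × List (Nat × Nat) × PySem.Set (Nat × Nat))).1) a b =
          getCell g a b +
            (if (a, b) ∈ tgtsB nrow ncol i j ds ∧ (a, b) ∉ fl then 1 else 0)) := by
  intro ds
  induction ds with
  | nil =>
    intro g pend fl _ _
    simp [tgtsB, sameShape_refl]
  | cons d ds ih =>
    intro g pend fl hR hnd
    simp only [List.foldl_cons]
    by_cases h0 : (d == ((0 : Int), (0 : Int))) = true
    · rw [if_pos h0]
      have htg : tgtsB nrow ncol i j (d :: ds) = tgtsB nrow ncol i j ds := by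
        simp only [tgtsB, List.filter_cons, h0]
        simp
      rw [htg]
      exact ih g pend fl hR (htg ▸ hnd)
    · rw [if_neg h0]
      by_cases hr : (0 ≤ (i : Int) + d.1 ∧ (i : Int) + d.1 < (nrow : Int) ∧
          0 ≤ (j : Int) + d.2 ∧ (j : Int) + d.2 < (ncol : Int))
      · have htg : tgtsB nrow ncol i j (d :: ds) =
            (((i : Int) + d.1).toNat, ((j : Int) + d.2).toNat) :: tgtsB nrow ncol i j ds := by
          simp only [tgtsB, List.filter_cons]
          rw [if_pos (by simp [h0, hr.1, hr.2.1, hr.2.2.1, hr.2.2.2])]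
          simp
        set tgt := (((i : Int) + d.1).toNat, ((j : Int) + d.2).toNat) with htgt
        have hnd2 : (tgtsB nrow ncol i j ds).Nodup ∧ tgt ∉ tgtsB nrow ncol i j ds := by
          rw [htg] at hnd
          exact ⟨(List.nodup_cons.mp hnd).2, (List.nodup_cons.mp hnd).1⟩
        have htr : tgt.1 < nrow ∧ tgt.2 < ncol := by
          constructor <;> simp only [htgt] <;> omega
        have hilen : tgt.1 < g.length := by rw [hR.1]; exact htr.1
        have hjlen : tgt.2 < (g.getD tgt.1 []).length := lt_of_lt_of_le htr.2 (hR.2 _ htr.1)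
        have hget : ∀ a b : Nat,
            getCell (setCell g tgt.1 tgt.2 (getCell g tgt.1 tgt.2 + 1)) a b =
              if (a, b) = tgt then getCell g tgt.1 tgt.2 + 1 else getCell g a b := by
          intro a b
          by_cases h : (a, b) = tgt
          · rw [if_pos h]
            have ha : a = tgt.1 := (Prod.ext_iff.mp h).1
            have hb : b = tgt.2 := (Prod.ext_iff.mp h).2
            subst ha; subst hb
            exact getCell_setCell_self _ hilen hjlen
          · rw [if_neg h, getCell_setCell_ne g _ (fun he => h (by rw [← he]))]
        have hfiltcongr : ∀ (gx : List (List Int)) (flx : List (Nat × Nat)),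
            (∀ c ∈ tgtsB nrow ncol i j ds, getCell gx c.1 c.2 = getCell g c.1 c.2) →
            (∀ c ∈ tgtsB nrow ncol i j ds, (flx.contains c = fl.contains c)) →
            (tgtsB nrow ncol i j ds).filter
              (fun c => !(flx.contains c) && decide (getCell gx c.1 c.2 + 1 > 9)) =
            (tgtsB nrow ncol i j ds).filter
              (fun c => !(fl.contains c) && decide (getCell g c.1 c.2 + 1 > 9)) := by
          intro gx flx hgx hflx
          apply List.filter_congr
          intro c hc
          rw [hgx c hc, hflx c hc]
        by_cases hct : PySem.Set.contains fl tgt = true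
        · have hmemfl : tgt ∈ fl := (PySem.Set.contains_iff fl tgt).mp hct
          rw [if_neg (by simp [hmemfl])]
          obtain ⟨ih1, ih2, ih3, ih4⟩ := ih g pend fl hR hnd2.1
          refine ⟨?_, ?_, ih3, ?_⟩
          · rw [ih1, htg, List.filter_cons, if_neg (by simp [hmemfl])]
          · rw [ih2, htg, List.filter_cons, if_neg (by simp [hmemfl])]
          · intro a b
            rw [ih4, htg]
            by_cases h : (a, b) = tgt
            · rw [if_neg (by simp [hnd2.2, h] :
                  ¬((a, b) ∈ tgtsB nrow ncol i j ds ∧ (a, b) ∉ fl)),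
                if_neg (by simp [h, hmemfl] :
                  ¬((a, b) ∈ tgt :: tgtsB nrow ncol i j ds ∧ (a, b) ∉ fl))]
            · by_cases hm : (a, b) ∈ tgtsB nrow ncol i j ds ∧ (a, b) ∉ fl
              · rw [if_pos hm, if_pos ⟨List.mem_cons_of_mem _ hm.1, hm.2⟩]
              · rw [if_neg hm, if_neg (by
                  intro habs
                  rcases List.mem_cons.mp habs.1 with hx | hx
                  · exact h hx
                  · exact hm ⟨hx, habs.2⟩)]
        · have hnfl : tgt ∉ fl := fun hmem => hct ((PySem.Set.contains_iff fl tgt).mpr hmem)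
          rw [if_pos (by simp [hr.1, hr.2.1, hr.2.2.1, hr.2.2.2, hnfl])]
          have hRect2 : Rect nrow ncol (setCell g tgt.1 tgt.2 (getCell g tgt.1 tgt.2 + 1)) :=
            rect_of_sameShape hR (sameShape_setCell ..)
          have hsame2 : ∀ c ∈ tgtsB nrow ncol i j ds,
              getCell (setCell g tgt.1 tgt.2 (getCell g tgt.1 tgt.2 + 1)) c.1 c.2 =
                getCell g c.1 c.2 := by
            intro c hc
            rw [hget, if_neg ?_]
            intro he
            have hce : c = tgt := (Prod.mk.eta).symm.trans he
            exact hnd2.2 (hce ▸ hc)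
          by_cases hv : getCell g tgt.1 tgt.2 + 1 > 9
          · rw [if_pos hv, PySem.Set.add_of_not_mem hnfl]
            obtain ⟨ih1, ih2, ih3, ih4⟩ := ih _ (pend ++ [tgt]) (fl ++ [tgt]) hRect2 hnd2.1
            have hflc : ∀ c ∈ tgtsB nrow ncol i j ds,
                ((fl ++ [tgt]).contains c = fl.contains c) := by
              intro c hc
              have hce : c ≠ tgt := fun he => hnd2.2 (he ▸ hc)
              simp [hce]
            refine ⟨?_, ?_, sameShape_trans (sameShape_setCell ..) ih3, ?_⟩
            · rw [ih1, hfiltcongr _ _ hsame2 hflc, htg, List.filter_cons,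
                if_pos (by simp [hnfl, hv])]
              simp
            · rw [ih2, hfiltcongr _ _ hsame2 hflc, htg, List.filter_cons,
                if_pos (by simp [hnfl, hv])]
              simp
            · intro a b
              rw [ih4, hget, htg]
              by_cases h : (a, b) = tgt
              · rw [if_pos h,
                  if_neg (by simp [hnd2.2, h] :
                    ¬((a, b) ∈ tgtsB nrow ncol i j ds ∧ (a, b) ∉ fl ++ [tgt])),
                  if_pos (⟨by simp [h], by rw [h]; exact hnfl⟩ :
                    (a, b) ∈ tgt :: tgtsB nrow ncol i j ds ∧ (a, b) ∉ fl)]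
                have hg : getCell g tgt.1 tgt.2 = getCell g a b := by rw [← h]
                omega
              · rw [if_neg h]
                by_cases hm : (a, b) ∈ tgtsB nrow ncol i j ds ∧ (a, b) ∉ fl
                · rw [if_pos (⟨hm.1, by
                      intro habs
                      rcases List.mem_append.mp habs with hx | hx
                      · exact hm.2 hx
                      · simp only [List.mem_singleton] at hx
                        exact h hx⟩ : (a, b) ∈ tgtsB nrow ncol i j ds ∧ (a, b) ∉ fl ++ [tgt]),
                    if_pos ⟨List.mem_cons_of_mem _ hm.1, hm.2⟩]
                · rw [if_neg (by
                      intro habs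
                      exact hm ⟨habs.1, fun hx => habs.2 (List.mem_append_left _ hx)⟩),
                    if_neg (by
                      intro habs
                      rcases List.mem_cons.mp habs.1 with hx | hx
                      · exact h hx
                      · exact hm ⟨hx, habs.2⟩)]
          · rw [if_neg hv]
            obtain ⟨ih1, ih2, ih3, ih4⟩ := ih _ pend fl hRect2 hnd2.1
            refine ⟨?_, ?_, sameShape_trans (sameShape_setCell ..) ih3, ?_⟩
            · rw [ih1, hfiltcongr _ _ hsame2 (fun _ _ => rfl), htg, List.filter_cons,
                if_neg (by simp [hv])]
            · rw [ih2, hfiltcongr _ _ hsame2 (fun _ _ => rfl), htg, List.filter_cons,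
                if_neg (by simp [hv])]
            · intro a b
              rw [ih4, hget, htg]
              by_cases h : (a, b) = tgt
              · rw [if_pos h,
                  if_neg (by simp [hnd2.2, h] :
                    ¬((a, b) ∈ tgtsB nrow ncol i j ds ∧ (a, b) ∉ fl)),
                  if_pos (⟨by simp [h], by rw [h]; exact hnfl⟩ :
                    (a, b) ∈ tgt :: tgtsB nrow ncol i j ds ∧ (a, b) ∉ fl)]
                have hg : getCell g tgt.1 tgt.2 = getCell g a b := by rw [← h]
                omega
              · rw [if_neg h]
                by_cases hm : (a, b) ∈ tgtsB nrow ncol i j ds ∧ (a, b) ∉ fl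
                · rw [if_pos hm, if_pos ⟨List.mem_cons_of_mem _ hm.1, hm.2⟩]
                · rw [if_neg hm, if_neg (by
                      intro habs
                      rcases List.mem_cons.mp habs.1 with hx | hx
                      · exact h hx
                      · exact hm ⟨hx, habs.2⟩)]
      · rw [if_neg (by
          simp only [Bool.and_eq_true, decide_eq_true_eq]
          tauto)]
        have htg : tgtsB nrow ncol i j (d :: ds) = tgtsB nrow ncol i j ds := by
          simp only [tgtsB, List.filter_cons]
          rw [if_neg (by
            simp only [Bool.and_eq_true, decide_eq_true_eq]
            tauto)]
        rw [htg]
        exact ih g pend fl hR (htg ▸ hnd)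

theorem nbrScanB_spec {nrow ncol : Nat} (i j : Nat) (_hi : i < nrow) (_hj : j < ncol) :
    ∀ (g : List (List Int)) (pend fl : List (Nat × Nat)), Rect nrow ncol g →
      (nbrScanB nrow ncol i j (g, pend, fl)).2.1 =
        pend ++ (nbrsB nrow ncol i j).filter
          (fun c => !(fl.contains c) && decide (getCell g c.1 c.2 + 1 > 9)) ∧
      (nbrScanB nrow ncol i j (g, pend, fl)).2.2 =
        fl ++ (nbrsB nrow ncol i j).filter
          (fun c => !(fl.contains c) && decide (getCell g c.1 c.2 + 1 > 9)) ∧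
      SameShape g (nbrScanB nrow ncol i j (g, pend, fl)).1 ∧
      (∀ a b : Nat, getCell (nbrScanB nrow ncol i j (g, pend, fl)).1 a b =
        getCell g a b +
          (if (a, b) ∈ nbrsB nrow ncol i j ∧ (a, b) ∉ fl then 1 else 0)) := by
  intro g pend fl hR
  exact scanB_fold i j deltasB g pend fl hR (nodup_nbrsB nrow ncol i j)

theorem invB_nil {nrow ncol : Nat} {g0 g : List (List Int)} {proc fl : List (Nat × Nat)}
    (hInv : InvB nrow ncol g0 g proc [] fl) : EndSt nrow ncol g0 g fl := by
  obtain ⟨hs, hnd, hflc, hsplit, hprz, hval, hoob, hmin⟩ := hInv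
  have hfp : fl = proc := by simpa using hsplit
  subst hfp
  refine ⟨hs, hnd, hflc, ?_, ?_, hoob, hmin⟩
  · intro c h1 h2
    by_cases hc : c ∈ fl
    · rw [if_pos hc]
      exact hprz c hc
    · rw [if_neg hc]
      exact (hval c h1 h2 hc).1
  · intro c h1 h2 hc
    have := hval c h1 h2 hc
    omega

theorem queueLoopB_end {nrow ncol : Nat} {g0 : List (List Int)}
    (hR : Rect nrow ncol g0) :
    ∀ (fuel : Nat) (g : List (List Int)) (proc pend fl : List (Nat × Nat)),
      InvB nrow ncol g0 g proc pend fl →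
      pend.length + (nrow * ncol - fl.length) ≤ fuel →
      EndSt nrow ncol g0 (queueLoopB nrow ncol fuel g pend fl).1
        (queueLoopB nrow ncol fuel g pend fl).2 := by
  intro fuel
  induction fuel with
  | zero =>
    intro g proc pend fl hInv hm
    have hpend : pend = [] := by
      cases pend with
      | nil => rfl
      | cons c rest => simp at hm
    subst hpend
    simpa [queueLoopB] using invB_nil hInv
  | succ fuel ih =>
    intro g proc pend fl hInv hm
    match pend with
    | [] => simpa [queueLoopB] using invB_nil hInv
    | (i, j) :: rest =>
      have hijfl : (i, j) ∈ fl := by rw [hInv.split]; simp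
      have hij : i < nrow ∧ j < ncol := hInv.flcells _ hijfl
      have hRg : Rect nrow ncol g := rect_of_sameShape hR hInv.shape
      have hilen : i < g.length := by rw [hRg.1]; exact hij.1
      have hjlen : j < (g.getD i []).length := lt_of_lt_of_le hij.2 (hRg.2 i hij.1)
      have hndsplit : ((i, j) ∉ proc ∧ (i, j) ∉ rest) ∧ proc.Nodup := by
        have h := hInv.nd
        rw [hInv.split] at h
        have h1 := List.nodup_append.mp h
        refine ⟨⟨fun hp => ?_, (List.nodup_cons.mp h1.2.1).1⟩, h1.1⟩
        exact (h1.2.2 _ hp _ List.mem_cons_self) rfl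
      have hget1 : ∀ a b : Nat, getCell (setCell g i j 0) a b =
          if (a, b) = (i, j) then (0 : Int) else getCell g a b := by
        intro a b
        by_cases h : (a, b) = (i, j)
        · rw [if_pos h]
          have ha : a = i := (Prod.ext_iff.mp h).1
          have hb : b = j := (Prod.ext_iff.mp h).2
          subst ha; subst hb
          exact getCell_setCell_self _ hilen hjlen
        · rw [if_neg h, getCell_setCell_ne g _ (fun he => h (by rw [← he]))]
      have hR1 : Rect nrow ncol (setCell g i j 0) :=
        rect_of_sameShape hRg (sameShape_setCell ..)
      obtain ⟨hs1, hs2, hs3, hs4⟩ := nbrScanB_spec i j hij.1 hij.2 (setCell g i j 0) rest fl hR1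
      rw [queueLoopB]
      set L := (nbrsB nrow ncol i j).filter
        (fun c => !(fl.contains c) && decide (getCell (setCell g i j 0) c.1 c.2 + 1 > 9)) with hL
      have hLmem : ∀ c ∈ L, c ∈ nbrsB nrow ncol i j ∧ c ∉ fl ∧
          getCell g c.1 c.2 + 1 > 9 := by
        intro c hc
        obtain ⟨hc1, hc2⟩ := List.mem_filter.mp hc
        simp only [Bool.and_eq_true, Bool.not_eq_true', decide_eq_true_eq] at hc2
        have hcne : c ∉ fl := by simpa using hc2.1
        have hcnij : c ≠ (i, j) := fun he => hcne (he ▸ hijfl)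
        refine ⟨hc1, hcne, ?_⟩
        have hv2 := hc2.2
        rwa [hget1, if_neg (by simpa [Prod.mk.eta] using hcnij)] at hv2
      have hLmem' : ∀ c, c ∈ nbrsB nrow ncol i j → c ∉ fl →
          getCell g c.1 c.2 + 1 > 9 → c ∈ L := by
        intro c h1 h2 h3
        refine List.mem_filter.mpr ⟨h1, ?_⟩
        simp only [Bool.and_eq_true, Bool.not_eq_true', decide_eq_true_eq]
        have hcnij : c ≠ (i, j) := fun he => h2 (he ▸ hijfl)
        refine ⟨by simpa using h2, ?_⟩
        rwa [hget1, if_neg (by simpa [Prod.mk.eta] using hcnij)]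
      have hLnodup : L.Nodup := (nodup_nbrsB ..).filter _
      have hLnfl : ∀ c ∈ L, c ∉ fl := fun c hc => (hLmem c hc).2.1
      have hndfl2 : (fl ++ L).Nodup := by
        refine List.Nodup.append hInv.nd hLnodup ?_
        intro a ha hb
        exact hLnfl a hb ha
      have hflc2 : ∀ c ∈ fl ++ L, c.1 < nrow ∧ c.2 < ncol := by
        intro c hc
        rcases List.mem_append.mp hc with h | h
        · exact hInv.flcells c h
        · have := (mem_nbrsB hij.1 hij.2).mp (hLmem c h).1
          exact ⟨this.1, this.2.1⟩
      have hcard : (fl ++ L).length ≤ nrow * ncol := by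
        have := nodup_len_le hndfl2 (fun c hc => mem_cellsRM.mpr (hflc2 c hc))
        rwa [length_cellsRM] at this
      rw [hs1, hs2]
      refine ih _ (proc ++ [(i, j)]) _ _ ?_ ?_
      · refine ⟨?_, hndfl2, hflc2, ?_, ?_, ?_, ?_, ?_⟩
        · exact sameShape_trans hInv.shape (sameShape_trans (sameShape_setCell ..) hs3)
        · rw [hInv.split]
          simp
        · -- processed cells stay zero
          intro c hc
          have hcfl : c ∈ fl := by
            rw [hInv.split]
            rcases List.mem_append.mp hc with h | h
            · exact List.mem_append_left _ h
            · simp only [List.mem_singleton] at h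
              subst h; simp
          have hind : ¬((c.1, c.2) ∈ nbrsB nrow ncol i j ∧ (c.1, c.2) ∉ fl) := by
            simp only [Prod.mk.eta]
            intro habs
            exact habs.2 hcfl
          rw [hs4, if_neg hind, add_zero, hget1]
          rcases List.mem_append.mp hc with h | h
          · rw [if_neg ?_]
            · exact hInv.przero c h
            · intro he
              have hce : c = (i, j) := (Prod.mk.eta).symm.trans he
              exact hndsplit.1.1 (hce ▸ h)
          · simp only [List.mem_singleton] at h
            subst h
            rw [if_pos Prod.mk.eta]
        · -- value equation and bound for unflashed cells
          intro c h1 h2 hc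
          simp only [List.mem_append, not_or] at hc
          obtain ⟨hcfl, hcL⟩ := hc
          have hcnij : c ≠ (i, j) := fun he => hcfl (he ▸ hijfl)
          have hg1c : getCell (setCell g i j 0) c.1 c.2 = getCell g c.1 c.2 := by
            rw [hget1, if_neg (by simpa [Prod.mk.eta] using hcnij)]
          have hvalc := hInv.val c h1 h2 hcfl
          have hfcnt : fCnt (proc ++ [(i, j)]) c = fCnt proc c + (if adjB (i, j) c then 1 else 0) :=
            fCnt_append_single ..
          rw [hs4, hg1c]
          simp only [Prod.mk.eta]
          by_cases hadj : adjB (i, j) c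
          · have hcmem : c ∈ nbrsB nrow ncol i j := (mem_nbrsB hij.1 hij.2).mpr ⟨h1, h2, hadj⟩
            rw [if_pos ⟨hcmem, hcfl⟩, hfcnt, if_pos hadj]
            have hbound : ¬(getCell g c.1 c.2 + 1 > 9) := by
              intro habs
              exact hcL (hLmem' c hcmem hcfl habs)
            constructor
            · push_cast
              omega
            · omega
          · have hcnmem : c ∉ nbrsB nrow ncol i j := by
              intro habs
              exact hadj ((mem_nbrsB hij.1 hij.2).mp habs).2.2
            rw [if_neg (fun habs => hcnmem habs.1), hfcnt, if_neg hadj]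
            constructor
            · push_cast
              omega
            · omega
        · -- out-of-range cells untouched
          intro a b hab
          have hnm : (a, b) ∉ nbrsB nrow ncol i j := by
            intro habs
            have := (mem_nbrsB hij.1 hij.2).mp habs
            exact hab ⟨this.1, this.2.1⟩
          rw [hs4, if_neg (fun habs => hnm habs.1), add_zero, hget1,
            if_neg (fun he => hab (by cases he; exact hij))]
          exact hInv.oob a b hab
        · -- minimality
          intro T hT c hc
          rcases List.mem_append.mp hc with h | h
          · exact hInv.minim T hT c h
          · obtain ⟨hnbr, hcfl, hvc⟩ := hLmem c h
            have hcr := (mem_nbrsB hij.1 hij.2).mp hnbr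
            by_contra hnotT
            have hclosed := hT c hcr.1 hcr.2.1 hnotT
            have hvalc := hInv.val c hcr.1 hcr.2.1 hcfl
            have hproc2 : (proc ++ [(i, j)]).Nodup := by
              refine List.Nodup.append hndsplit.2 (List.nodup_singleton _) ?_
              intro a ha hb
              simp only [List.mem_singleton] at hb
              subst hb
              exact hndsplit.1.1 ha
            have hsubT : proc ++ [(i, j)] ⊆ T := by
              intro x hx
              rcases List.mem_append.mp hx with hx2 | hx2
              · exact hInv.minim T hT x (by rw [hInv.split]; exact List.mem_append_left _ hx2)
              · simp only [List.mem_singleton] at hx2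
                subst hx2
                exact hInv.minim T hT _ hijfl
            have hmono := fCnt_mono hproc2 hsubT c
            have hfcnt : fCnt (proc ++ [(i, j)]) c = fCnt proc c + 1 := by
              rw [fCnt_append_single, if_pos hcr.2.2]
            omega
      · simp only [List.length_append, List.length_cons] at hm hcard ⊢
        omega

theorem grid_ext {g0 g1 g2 : List (List Int)} (h1 : SameShape g0 g1) (h2 : SameShape g0 g2)
    (h : ∀ i j : Nat, getCell g1 i j = getCell g2 i j) : g1 = g2 := by
  apply List.ext_getElem (h1.1.trans h2.1.symm)
  intro n hn1 hn2
  apply List.ext_getElem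
  · have := (h1.2 n).trans (h2.2 n).symm
    rwa [List.getD_eq_getElem _ _ hn1, List.getD_eq_getElem _ _ hn2] at this
  · intro m hm1 hm2
    have hge := h n m
    unfold getCell at hge
    rw [List.getD_eq_getElem _ _ hn1, List.getD_eq_getElem _ _ hn2] at hge
    rwa [List.getD_eq_getElem _ _ hm1, List.getD_eq_getElem _ _ hm2] at hge

theorem endSt_unique {nrow ncol : Nat} {g0 g1 g2 : List (List Int)}
    {F1 F2 : List (Nat × Nat)}
    (h1 : EndSt nrow ncol g0 g1 F1) (h2 : EndSt nrow ncol g0 g2 F2) : g1 = g2 := by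
  obtain ⟨hs1, hnd1, hfc1, hval1, hcl1, hoob1, hmin1⟩ := h1
  obtain ⟨hs2, hnd2, hfc2, hval2, hcl2, hoob2, hmin2⟩ := h2
  have hmem : ∀ a, a ∈ F1 ↔ a ∈ F2 :=
    fun a => ⟨fun h => hmin1 F2 hcl2 a h, fun h => hmin2 F1 hcl1 a h⟩
  have hcnt := fCnt_eq_of_mem_iff hnd1 hnd2 hmem
  refine grid_ext hs1 hs2 ?_
  intro i j
  by_cases hin : i < nrow ∧ j < ncol
  · rw [hval1 (i, j) hin.1 hin.2, hval2 (i, j) hin.1 hin.2, hcnt (i, j)]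
    by_cases hiF : (i, j) ∈ F1
    · rw [if_pos hiF, if_pos ((hmem _).mp hiF)]
    · rw [if_neg hiF, if_neg (fun h => hiF ((hmem _).mpr h))]
  · rw [hoob1 i j hin, hoob2 i j hin]

theorem stepA_end {nrow ncol : Nat} {g : List (List Int)} (hR : Rect nrow ncol g) :
    EndSt nrow ncol g
      (stackLoopA nrow ncol (10 * (nrow * ncol) + 1) g
        ((cellsRM nrow ncol).reverse) PySem.Set.empty).1
      (stackLoopA nrow ncol (10 * (nrow * ncol) + 1) g
        ((cellsRM nrow ncol).reverse) PySem.Set.empty).2 := by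
  have hemp : (PySem.Set.empty : PySem.Set (Nat × Nat)) = ([] : List (Nat × Nat)) := rfl
  rw [hemp]
  refine stackLoopA_end hR (10 * (nrow * ncol) + 1) g _ [] ?_ ?_
  · refine ⟨sameShape_refl g, List.nodup_nil, by simp, ?_, by simp, ?_, ?_, fun _ _ _ => rfl, by simp⟩
    · intro c hc
      exact mem_cellsRM.mp (List.mem_reverse.mp hc)
    · intro c h1 h2 _
      have hcm : c ∈ cellsRM nrow ncol := mem_cellsRM.mpr ⟨h1, h2⟩
      have : ((cellsRM nrow ncol).reverse).count c = 1 := by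
        rw [List.count_reverse]
        exact List.count_eq_one_of_mem (nodup_cellsRM ..) hcm
      rw [this]
      simp [fCnt]
    · intro c h1 h2 _ hcnt
      have hcm : c ∈ cellsRM nrow ncol := mem_cellsRM.mpr ⟨h1, h2⟩
      rw [List.count_reverse] at hcnt
      exact absurd (List.count_eq_one_of_mem (nodup_cellsRM ..) hcm) (by omega)
  · simp [length_cellsRM]
    omega

theorem phase1B_spec {nrow ncol : Nat} :
    ∀ (cs : List (Nat × Nat)) (g : List (List Int)) (q fl : List (Nat × Nat)),
      Rect nrow ncol g → cs.Nodup → (∀ c ∈ cs, c.1 < nrow ∧ c.2 < ncol) →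
      (∀ c ∈ cs, c ∉ fl) →
      (cs.foldl (fun st c =>
          let v := getCell st.1 c.1 c.2 + 1
          let g' := setCell st.1 c.1 c.2 v
          if v > 9 then (g', st.2.1 ++ [c], PySem.Set.add st.2.2 c) else (g', st.2.1, st.2.2))
        ((g, q, fl) : List (List Int) × List (Nat × Nat) × PySem.Set (Nat × Nat))).2.1 =
          q ++ cs.filter (fun c => decide (getCell g c.1 c.2 + 1 > 9)) ∧
      (cs.foldl (fun st c =>
          let v := getCell st.1 c.1 c.2 + 1
          let g' := setCell st.1 c.1 c.2 v
          if v > 9 then (g', st.2.1 ++ [c], PySem.Set.add st.2.2 c) else (g', st.2.1, st.2.2))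
        ((g, q, fl) : List (List Int) × List (Nat × Nat) × PySem.Set (Nat × Nat))).2.2 =
          fl ++ cs.filter (fun c => decide (getCell g c.1 c.2 + 1 > 9)) ∧
      SameShape g (cs.foldl (fun st c =>
          let v := getCell st.1 c.1 c.2 + 1
          let g' := setCell st.1 c.1 c.2 v
          if v > 9 then (g', st.2.1 ++ [c], PySem.Set.add st.2.2 c) else (g', st.2.1, st.2.2))
        ((g, q, fl) : List (List Int) × List (Nat × Nat) × PySem.Set (Nat × Nat))).1 ∧
      (∀ a b : Nat, getCell ((cs.foldl (fun st c =>
          let v := getCell st.1 c.1 c.2 + 1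
          let g' := setCell st.1 c.1 c.2 v
          if v > 9 then (g', st.2.1 ++ [c], PySem.Set.add st.2.2 c) else (g', st.2.1, st.2.2))
        ((g, q, fl) : List (List Int) × List (Nat × Nat) × PySem.Set (Nat × Nat))).1) a b =
          getCell g a b + (if (a, b) ∈ cs then 1 else 0)) := by
  intro cs
  induction cs with
  | nil =>
    intro g q fl _ _ _ _
    simp [sameShape_refl]
  | cons c cs ih =>
    intro g q fl hR hnd hcell hnew
    have hc : c.1 < nrow ∧ c.2 < ncol := hcell c List.mem_cons_self
    have hilen : c.1 < g.length := by rw [hR.1]; exact hc.1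
    have hjlen : c.2 < (g.getD c.1 []).length := lt_of_lt_of_le hc.2 (hR.2 c.1 hc.1)
    have hcnotin : c ∉ cs := (List.nodup_cons.mp hnd).1
    have hget : ∀ a b : Nat,
        getCell (setCell g c.1 c.2 (getCell g c.1 c.2 + 1)) a b =
          if (a, b) = c then getCell g c.1 c.2 + 1 else getCell g a b := by
      intro a b
      by_cases h : (a, b) = c
      · rw [if_pos h]
        have ha : a = c.1 := (Prod.ext_iff.mp h).1
        have hb : b = c.2 := (Prod.ext_iff.mp h).2
        subst ha; subst hb
        exact getCell_setCell_self _ hilen hjlen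
      · rw [if_neg h, getCell_setCell_ne g _ ?_]
        intro he
        exact h (by rw [← he])
    have hfilter : ∀ g' : List (List Int),
        (∀ d ∈ cs, getCell g' d.1 d.2 = getCell g d.1 d.2) →
        cs.filter (fun d => decide (getCell g' d.1 d.2 + 1 > 9)) =
        cs.filter (fun d => decide (getCell g d.1 d.2 + 1 > 9)) := by
      intro g' hsame
      apply List.filter_congr
      intro d hd
      rw [hsame d hd]
    have hRect2 : Rect nrow ncol (setCell g c.1 c.2 (getCell g c.1 c.2 + 1)) :=
      rect_of_sameShape hR (sameShape_setCell ..)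
    have hsame2 : ∀ d ∈ cs, getCell (setCell g c.1 c.2 (getCell g c.1 c.2 + 1)) d.1 d.2 =
        getCell g d.1 d.2 := by
      intro d hd
      rw [hget]
      rw [if_neg ?_]
      intro he
      have hde : d = c := (Prod.mk.eta).symm.trans he
      exact hcnotin (hde ▸ hd)
    simp only [List.foldl_cons]
    by_cases hv : getCell g c.1 c.2 + 1 > 9
    · rw [if_pos hv, PySem.Set.add_of_not_mem (hnew c List.mem_cons_self)]
      obtain ⟨ih1, ih2, ih3, ih4⟩ := ih _ (q ++ [c]) (fl ++ [c]) hRect2 (List.nodup_cons.mp hnd).2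
        (fun d hd => hcell d (List.mem_cons_of_mem _ hd))
        (fun d hd => by
          intro habs
          rcases List.mem_append.mp habs with h | h
          · exact hnew d (List.mem_cons_of_mem _ hd) h
          · simp only [List.mem_singleton] at h
            exact hcnotin (h ▸ hd))
      refine ⟨?_, ?_, ?_, ?_⟩
      · rw [ih1, hfilter _ hsame2, List.filter_cons, if_pos (by simpa using hv)]
        simp
      · rw [ih2, hfilter _ hsame2, List.filter_cons, if_pos (by simpa using hv)]
        simp
      · exact sameShape_trans (sameShape_setCell ..) ih3
      · intro a b
        rw [ih4, hget]
        by_cases h : (a, b) = c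
        · have hnotcs : (a, b) ∉ cs := by rw [h]; exact hcnotin
          have hg : getCell g c.1 c.2 = getCell g a b := by rw [← h]
          rw [if_pos h, if_neg hnotcs, if_pos (by simp [h] : (a, b) ∈ c :: cs)]
          omega
        · rw [if_neg h]
          by_cases hmem : (a, b) ∈ cs
          · simp only [if_pos hmem, List.mem_cons, if_pos (Or.inr hmem)]
          · simp only [if_neg hmem, List.mem_cons,
              if_neg (by simp [h, hmem] : ¬((a, b) = c ∨ (a, b) ∈ cs))]
    · rw [if_neg hv]
      obtain ⟨ih1, ih2, ih3, ih4⟩ := ih _ q fl hRect2 (List.nodup_cons.mp hnd).2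
        (fun d hd => hcell d (List.mem_cons_of_mem _ hd))
        (fun d hd => hnew d (List.mem_cons_of_mem _ hd))
      refine ⟨?_, ?_, ?_, ?_⟩
      · rw [ih1, hfilter _ hsame2, List.filter_cons, if_neg (by simpa using hv)]
      · rw [ih2, hfilter _ hsame2, List.filter_cons, if_neg (by simpa using hv)]
      · exact sameShape_trans (sameShape_setCell ..) ih3
      · intro a b
        rw [ih4, hget]
        by_cases h : (a, b) = c
        · have hnotcs : (a, b) ∉ cs := by rw [h]; exact hcnotin
          have hg : getCell g c.1 c.2 = getCell g a b := by rw [← h]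
          rw [if_pos h, if_neg hnotcs, if_pos (by simp [h] : (a, b) ∈ c :: cs)]
          omega
        · rw [if_neg h]
          by_cases hmem : (a, b) ∈ cs
          · simp only [if_pos hmem, List.mem_cons, if_pos (Or.inr hmem)]
          · simp only [if_neg hmem, List.mem_cons,
              if_neg (by simp [h, hmem] : ¬((a, b) = c ∨ (a, b) ∈ cs))]

theorem stepB_end {nrow ncol : Nat} {g : List (List Int)} (hR : Rect nrow ncol g) :
    EndSt nrow ncol g
      (queueLoopB nrow ncol (nrow * ncol + 1) (phase1B nrow ncol g).1
        (phase1B nrow ncol g).2.1 (phase1B nrow ncol g).2.2).1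
      (queueLoopB nrow ncol (nrow * ncol + 1) (phase1B nrow ncol g).1
        (phase1B nrow ncol g).2.1 (phase1B nrow ncol g).2.2).2 := by
  obtain ⟨p1, p2, p3, p4⟩ := phase1B_spec (cellsRM nrow ncol) g [] [] hR (nodup_cellsRM ..)
    (fun c hc => mem_cellsRM.mp hc) (fun c _ => List.not_mem_nil)
  have hp1 : (phase1B nrow ncol g).2.1 =
      (cellsRM nrow ncol).filter (fun c => decide (getCell g c.1 c.2 + 1 > 9)) := by
    simpa [phase1B] using p1
  have hp2 : (phase1B nrow ncol g).2.2 =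
      (cellsRM nrow ncol).filter (fun c => decide (getCell g c.1 c.2 + 1 > 9)) := by
    simpa [phase1B] using p2
  have hp3 : SameShape g (phase1B nrow ncol g).1 := p3
  have hp4 : ∀ a b : Nat, getCell (phase1B nrow ncol g).1 a b =
      getCell g a b + (if (a, b) ∈ cellsRM nrow ncol then 1 else 0) := p4
  set L0 := (cellsRM nrow ncol).filter (fun c => decide (getCell g c.1 c.2 + 1 > 9)) with hL0
  have hL0nd : L0.Nodup := (nodup_cellsRM ..).filter _
  have hL0cells : ∀ c ∈ L0, c.1 < nrow ∧ c.2 < ncol :=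
    fun c hc => mem_cellsRM.mp (List.mem_filter.mp hc).1
  have hL0len : L0.length ≤ nrow * ncol := by
    have := nodup_len_le hL0nd (fun c hc => (List.mem_filter.mp hc).1)
    rwa [length_cellsRM] at this
  rw [hp1, hp2]
  refine queueLoopB_end hR _ _ [] _ _ ?_ ?_
  · refine ⟨hp3, hL0nd, hL0cells, by simp, by simp, ?_, ?_, ?_⟩
    · -- value equation for unflashed cells
      intro c h1 h2 hc
      have hcm : c ∈ cellsRM nrow ncol := mem_cellsRM.mpr ⟨h1, h2⟩
      have hval := hp4 c.1 c.2
      rw [if_pos (by simpa [Prod.mk.eta] using hcm)] at hval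
      have hnot : ¬(getCell g c.1 c.2 + 1 > 9) := by
        intro habs
        exact hc (List.mem_filter.mpr ⟨hcm, by simpa using habs⟩)
      constructor
      · rw [hval]
        simp [fCnt]
      · omega
    · -- out-of-range cells untouched
      intro a b hab
      have := hp4 a b
      rwa [if_neg (fun habs => hab (mem_cellsRM.mp habs)), add_zero] at this
    · -- minimality
      intro T hT c hc
      obtain ⟨hcm, hcv⟩ := List.mem_filter.mp hc
      have hcr := mem_cellsRM.mp hcm
      by_contra hnotT
      have hclosed := hT c hcr.1 hcr.2 hnotT
      have hv : getCell g c.1 c.2 + 1 > 9 := by simpa using hcv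
      have : (0 : Int) ≤ (fCnt T c : Int) := by positivity
      omega
  · omega

theorem loops_eq {nrow ncol : Nat} :
    ∀ (fuel : Nat) (g : List (List Int)) (step : Int), Rect nrow ncol g →
      whileLoopA nrow ncol fuel g step = whileLoopB nrow ncol fuel g step := by
  intro fuel
  induction fuel with
  | zero =>
    intro g step _
    rfl
  | succ fuel ih =>
    intro g step hR
    have hA := stepA_end (nrow := nrow) (ncol := ncol) (g := g) hR
    have hB := stepB_end (nrow := nrow) (ncol := ncol) (g := g) hR
    have hg : (stackLoopA nrow ncol (10 * (nrow * ncol) + 1) g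
        ((cellsRM nrow ncol).reverse) PySem.Set.empty).1 =
        (queueLoopB nrow ncol (nrow * ncol + 1) (phase1B nrow ncol g).1
          (phase1B nrow ncol g).2.1 (phase1B nrow ncol g).2.2).1 := endSt_unique hA hB
    rw [whileLoopA, whileLoopB, syncScan, hg]
    have hRect2 : Rect nrow ncol (queueLoopB nrow ncol (nrow * ncol + 1) (phase1B nrow ncol g).1
        (phase1B nrow ncol g).2.1 (phase1B nrow ncol g).2.2).1 :=
      rect_of_sameShape hR hB.1
    by_cases hs : ((List.range nrow).all fun i =>
        (List.range ncol).all fun j => getCell (queueLoopB nrow ncol (nrow * ncol + 1)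
          (phase1B nrow ncol g).1 (phase1B nrow ncol g).2.1
          (phase1B nrow ncol g).2.2).1 i j == 0) = true
    · rw [if_pos hs, if_pos hs]
    · rw [if_neg hs, if_neg hs]
      exact ih _ (step + 1) hRect2

-- ===== VERDICT (by name: the statement is the Claim_ definition above) =====
theorem part_two_spec : Claim_equal_part_two := by
  intro octs _ hpre
  unfold Spec_part_two part_two part_two_alt
  apply loops_eq
  refine ⟨rfl, fun k hk => ?_⟩
  have hk' : k < octs.length := by simpa using hk
  refine hpre.2 _ ?_
  rw [List.getD_eq_getElem octs [] hk']
  exact List.getElem_mem hk'
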